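-- pv_equiv track=rewrite | github.com/kiangkiangkiang/Machine-Learning-Serving-Example-by-AWS | pipeline_src/utils.py | drift_offsets_mapping
-- ===== SOURCE A (Python) =====
-- from typing import Any, Dict, Iterator, List, Optional, Tuple, Union
--
-- def drift_offsets_mapping(offset_mapping: Tuple[Tuple[int, int]]) -> Tuple[List[List[int]], int]:
--     """Scale the offset_mapping in tokenization output to align with the prompt learning format.
--
--     Note: 因為 tokenization 後有些字會被 tokenize 在一起，所以 index 會和原本的有所差異，因此需做調整，將 tokenize 前後的 index 對齊。
--
--     Args:
--         offset_mapping (Tuple[Tuple[int, int]]): Tokenization outpu. Use argument 'return_offsets_mapping=True'.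
--
--     Returns:
--         1. List[List[int, int]]: Scaled format, which is to adjust index after adding '[CLS] prompt [SEP]'.
--         2. int: Drift term, which defines the scaling of drift after adjustment.
--     """
--
--     offset_mapping = [list(x) for x in offset_mapping]
--     drift = 0
--     for index in range(1, len(offset_mapping)):
--         mapping = offset_mapping[index]
--         if mapping[0] == 0 and mapping[1] == 0 and drift == 0:
--             drift = offset_mapping[index - 1][1] + 1  # [SEP] token
--         if mapping[0] == 0 and mapping[1] == 0:
--             continue
--         offset_mapping[index][0] += drift
--         offset_mapping[index][1] += drift
--     return offset_mapping, drift
-- ===== SOURCE B (Python) =====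
-- def drift_offsets_mapping(offset_mapping):
--     """Locate the first (0,0) separator after index 0, then shift every later
--     non-(0,0) entry by the preceding token's end + 1 in one comprehension."""
--     n = len(offset_mapping)
--     boundary = next((i for i in range(1, n)
--                      if offset_mapping[i][0] == 0 and offset_mapping[i][1] == 0), None)
--     if boundary is None:
--         return [list(m) for m in offset_mapping], 0
--     drift = offset_mapping[boundary - 1][1] + 1
--     return ([[m[0] + drift, m[1] + drift] if i > boundary and (m[0] or m[1]) else list(m)
--              for i, m in enumerate(offset_mapping)], drift)
-- ===== Notes on version B (the rewrite author's own statement) =====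
-- stated objective: alternative
-- what changed: Replaced A's stateful single loop threading a drift accumulator through in-place updates by a two-phase locate-then-transform (find the first (0,0) separator after index 0, then shift all later non-(0,0) entries in one comprehension); Pre_ excludes malformed inputs where a (0,0) slot is preceded by an offset ending at -1 (impossible for tokenizer offsets, whose ends are nonnegative), on which A's drift==0 re-trigger makes the chosen boundary accidental.
import Mathlib
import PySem

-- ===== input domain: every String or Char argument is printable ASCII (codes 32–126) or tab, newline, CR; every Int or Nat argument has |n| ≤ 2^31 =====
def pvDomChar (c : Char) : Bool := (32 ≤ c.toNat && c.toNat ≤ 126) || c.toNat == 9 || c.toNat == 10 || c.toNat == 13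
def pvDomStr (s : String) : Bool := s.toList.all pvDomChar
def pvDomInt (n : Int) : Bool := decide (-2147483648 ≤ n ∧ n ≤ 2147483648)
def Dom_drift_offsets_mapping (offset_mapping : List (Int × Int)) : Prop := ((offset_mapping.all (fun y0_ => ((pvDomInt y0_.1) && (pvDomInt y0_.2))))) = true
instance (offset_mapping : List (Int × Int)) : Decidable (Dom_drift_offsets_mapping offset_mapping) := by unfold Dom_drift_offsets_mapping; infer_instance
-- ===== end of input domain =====

-- B replaces A's stateful single loop by a locate-then-transform two-phase shape (find the
-- first (0,0) separator after index 0, then shift everything after it in one comprehension);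
-- objective: alternative decomposition, same cost. Pre_ restricts to well-formed offset
-- mappings (no (0,0) slot preceded by an end of -1).

-- ===== PORT A =====
-- one iteration of A's for-loop; the loop indices satisfy 0 ≤ index < len, so the
-- in-range list reads/writes are rendered with List.getD / List.set (exact there)
def driftStepA (st : List (List Int) × Int) (index : Int) : List (List Int) × Int :=
  let mapping := st.1.getD index.toNat []
  let drift := if mapping.getD 0 0 = 0 ∧ mapping.getD 1 0 = 0 ∧ st.2 = 0
               then (st.1.getD (index.toNat - 1) []).getD 1 0 + 1
               else st.2
  if mapping.getD 0 0 = 0 ∧ mapping.getD 1 0 = 0 then (st.1, drift)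
  else (st.1.set index.toNat [mapping.getD 0 0 + drift, mapping.getD 1 0 + drift], drift)

def drift_offsets_mapping (offset_mapping : List (Int × Int)) : List (List Int) × Int :=
  let om0 := offset_mapping.map (fun x => [x.1, x.2])
  (PySem.List.pyRange 1 (om0.length : Int) 1).foldl driftStepA (om0, 0)

-- ===== PORT B =====
-- B's 'next(i for i in range(1, n) if offset_mapping[i] == (0,0))' boundary search,
-- rendered as a first-match scan carrying the running index
def findSep : List (Int × Int) → Nat → Option Nat
  | x :: rest, i => if x.1 = 0 ∧ x.2 = 0 then some i else findSep rest (i + 1)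
  | [], _ => none

def drift_offsets_mapping_alt (offset_mapping : List (Int × Int)) : List (List Int) × Int :=
  match findSep (offset_mapping.drop 1) 1 with
  | none => (offset_mapping.map (fun x => [x.1, x.2]), 0)
  | some b =>
      -- boundary-1 is always in range, so the read is rendered with List.getD (exact there)
      let drift := (offset_mapping.getD (b - 1) (0, 0)).2 + 1
      ((PySem.List.enumerate offset_mapping 0).map (fun p =>
          if (b : Int) < p.1 ∧ ¬(p.2.1 = 0 ∧ p.2.2 = 0)
          then [p.2.1 + drift, p.2.2 + drift]
          else [p.2.1, p.2.2]), drift)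

-- ===== PRECONDITION & SPEC =====
-- Pre_ excludes malformed inputs where a (0,0) slot is preceded by an offset ending at -1
-- (impossible for tokenizer offsets, whose ends are nonnegative); there A's drift==0
-- re-trigger makes the chosen boundary accidental.
def Pre_drift_offsets_mapping (offset_mapping : List (Int × Int)) : Prop :=
  ∀ i < offset_mapping.length, 1 ≤ i →
    offset_mapping.getD i (0, 0) = (0, 0) →
    (offset_mapping.getD (i - 1) (0, 0)).2 ≠ -1
instance (offset_mapping : List (Int × Int)) : Decidable (Pre_drift_offsets_mapping offset_mapping) := by unfold Pre_drift_offsets_mapping; infer_instance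

def pvWitness_drift_offsets_mapping : (List (Int × Int)) := [(0, 3), (4, 7), (0, 0), (1, 2), (3, 5)]

def Spec_drift_offsets_mapping (offset_mapping : List (Int × Int)) (out : List (List Int) × Int) : Prop := out = drift_offsets_mapping_alt offset_mapping
instance (offset_mapping : List (Int × Int)) (out : List (List Int) × Int) : Decidable (Spec_drift_offsets_mapping offset_mapping out) := by unfold Spec_drift_offsets_mapping; infer_instance

-- ===== CLAIM (what is proved, stated in full; the proofs are below) =====
def Claim_equal_drift_offsets_mapping : Prop := ∀ (offset_mapping : List (Int × Int)), Dom_drift_offsets_mapping offset_mapping → Pre_drift_offsets_mapping offset_mapping → Spec_drift_offsets_mapping offset_mapping (drift_offsets_mapping offset_mapping)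

-- ===== LEMMAS AND PROOFS =====

-- elements with index in [lo, hi) that are not (0,0), shifted by d; everything else verbatim
def shiftF (lo hi : Int) (d : Int) (om : List (Int × Int)) : List (List Int) :=
  om.mapIdx (fun i m =>
    if lo ≤ (i : Int) ∧ (i : Int) < hi ∧ ¬(m.1 = 0 ∧ m.2 = 0)
    then [m.1 + d, m.2 + d] else [m.1, m.2])

theorem shiftF_length (lo hi d : Int) (om : List (Int × Int)) :
    (shiftF lo hi d om).length = om.length := by
  simp [shiftF]

theorem shiftF_getElem (lo hi d : Int) (om : List (Int × Int)) (i : Nat) (h : i < om.length) :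
    (shiftF lo hi d om)[i]'(by rw [shiftF_length]; exact h)
      = if lo ≤ (i : Int) ∧ (i : Int) < hi ∧ ¬((om[i]'h).1 = 0 ∧ (om[i]'h).2 = 0)
        then [(om[i]'h).1 + d, (om[i]'h).2 + d] else [(om[i]'h).1, (om[i]'h).2] := by
  simp [shiftF, List.getElem_mapIdx]

theorem shiftF_getD (lo hi d : Int) (om : List (Int × Int)) (i : Nat) (h : i < om.length) :
    (shiftF lo hi d om).getD i []
      = if lo ≤ (i : Int) ∧ (i : Int) < hi ∧ ¬((om[i]'h).1 = 0 ∧ (om[i]'h).2 = 0)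
        then [(om[i]'h).1 + d, (om[i]'h).2 + d] else [(om[i]'h).1, (om[i]'h).2] := by
  rw [List.getD_eq_getElem?_getD,
      List.getElem?_eq_getElem (by rw [shiftF_length]; exact h), Option.getD_some,
      shiftF_getElem lo hi d om i h]

theorem shiftF_getD_oob (lo hi d : Int) (om : List (Int × Int)) (i : Nat)
    (h : om.length ≤ i) : (shiftF lo hi d om).getD i [] = [] := by
  rw [List.getD_eq_getElem?_getD, List.getElem?_eq_none (by rw [shiftF_length]; exact h)]
  rfl

theorem shiftF_self (lo d : Int) (om : List (Int × Int)) :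
    shiftF lo lo d om = om.map (fun x => [x.1, x.2]) := by
  apply List.ext_getElem
  · simp [shiftF_length]
  · intro i h1 h2
    rw [shiftF_getElem lo lo d om i (by simpa [shiftF_length] using h1), List.getElem_map]
    rw [if_neg]
    rintro ⟨h3, h4, -⟩
    omega

theorem toL_getD (om : List (Int × Int)) (j : Nat) (h : j < om.length) :
    (om.map (fun x : Int × Int => [x.1, x.2])).getD j [] = [(om[j]'h).1, (om[j]'h).2] := by
  rw [List.getD_eq_getElem?_getD, List.getElem?_eq_getElem (by simpa using h),
      Option.getD_some, List.getElem_map]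

theorem getD_eq_getElem_pair (om : List (Int × Int)) (j : Nat) (h : j < om.length) :
    om.getD j (0, 0) = om[j]'h := by
  rw [List.getD_eq_getElem?_getD, List.getElem?_eq_getElem h, Option.getD_some]

theorem drop1_getD (om : List (Int × Int)) (i : Nat) :
    (om.drop 1).getD i (0, 0) = om.getD (1 + i) (0, 0) := by
  rw [List.getD_eq_getElem?_getD, List.getD_eq_getElem?_getD, List.getElem?_drop]

-- evaluation lemmas for one iteration of A's loop, by the shape of the current element
theorem stepA_skip (L : List (List Int)) (dr : Int) (j : Int) (a b : Int)
    (hmap : L.getD j.toNat [] = [a, b]) (ha : a = 0) (hb : b = 0) (hdr : dr ≠ 0) :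
    driftStepA (L, dr) j = (L, dr) := by
  simp only [driftStepA.eq_def, hmap, List.getD_cons_zero, List.getD_cons_succ]
  rw [if_pos ⟨ha, hb⟩, if_neg (by rintro ⟨-, -, h0⟩; exact hdr h0)]

theorem stepA_oob (L : List (List Int)) (dr : Int) (j : Int)
    (hmap : L.getD j.toNat [] = []) (hdr : dr ≠ 0) :
    driftStepA (L, dr) j = (L, dr) := by
  simp only [driftStepA.eq_def, hmap]
  rw [if_pos (by simp), if_neg (by rintro ⟨-, -, h0⟩; exact hdr h0)]

theorem stepA_trigger (L : List (List Int)) (j : Int) (a b p : Int)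
    (hmap : L.getD j.toNat [] = [a, b]) (ha : a = 0) (hb : b = 0)
    (hprev : (L.getD (j.toNat - 1) []).getD 1 0 = p) :
    driftStepA (L, 0) j = (L, p + 1) := by
  simp only [driftStepA.eq_def, hmap, List.getD_cons_zero, List.getD_cons_succ]
  rw [if_pos ⟨ha, hb⟩, if_pos ⟨ha, hb, by trivial⟩, hprev]

theorem stepA_shift (L : List (List Int)) (dr : Int) (j : Int) (a b : Int)
    (hmap : L.getD j.toNat [] = [a, b]) (hnz : ¬(a = 0 ∧ b = 0)) :
    driftStepA (L, dr) j = (L.set j.toNat [a + dr, b + dr], dr) := by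
  simp only [driftStepA.eq_def, hmap, List.getD_cons_zero, List.getD_cons_succ]
  rw [if_neg hnz]
  simp only [if_neg (show ¬(a = 0 ∧ b = 0 ∧ dr = 0) from by rintro ⟨h1, h2, -⟩; exact hnz ⟨h1, h2⟩)]

-- phase 2 of A's loop: once drift is non-zero it never changes, and each index ≥ k
-- that is not (0,0) gets shifted, independently
theorem L2 (m : Nat) (k : Int) (om : List (Int × Int)) (d : Int)
    (hd : d ≠ 0) (hk : 0 ≤ k) :
    (PySem.List.pyRange k (k + m) 1).foldl driftStepA (shiftF k k d om, d)
      = (shiftF k (k + m) d om, d) := by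
  induction m with
  | zero =>
      rw [show (k + ((0 : Nat) : Int)) = k by push_cast; ring,
          PySem.List.pyRange_one_eq_nil (le_refl k)]
      rfl
  | succ m ih =>
      rw [show (k + ((m + 1 : Nat) : Int)) = (k + (m : Nat)) + 1 by push_cast; ring,
          PySem.List.pyRange_one_succ_right (by omega), List.foldl_append, ih]
      simp only [List.foldl_cons, List.foldl_nil]
      by_cases hlen : (k + (m : Nat)).toNat < om.length
      · have hmap : (shiftF k (k + (m : Nat)) d om).getD (k + (m : Nat)).toNat []
            = [(om[(k + (m : Nat)).toNat]'hlen).1, (om[(k + (m : Nat)).toNat]'hlen).2] := by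
          rw [shiftF_getD k (k + (m : Nat)) d om _ hlen, if_neg (by rintro ⟨-, h4, -⟩; omega)]
        by_cases hz : (om[(k + (m : Nat)).toNat]'hlen).1 = 0 ∧ (om[(k + (m : Nat)).toNat]'hlen).2 = 0
        · rw [stepA_skip _ _ _ _ _ hmap hz.1 hz.2 hd]
          refine Prod.ext ?_ rfl
          apply List.ext_getElem
          · simp [shiftF_length]
          · intro i h1 h2
            rw [shiftF_getElem k (k + (m : Nat)) d om i (by simpa [shiftF_length] using h1),
                shiftF_getElem k (k + (m : Nat) + 1) d om i (by simpa [shiftF_length] using h1)]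
            by_cases hib : i = (k + (m : Nat)).toNat
            · subst hib
              rw [if_neg (by rintro ⟨-, -, h5⟩; exact h5 hz),
                  if_neg (by rintro ⟨-, -, h5⟩; exact h5 hz)]
            · by_cases hc : k ≤ (i : Int) ∧ (i : Int) < k + (m : Nat) ∧
                  ¬((om[i]'(by simpa [shiftF_length] using h1)).1 = 0 ∧
                    (om[i]'(by simpa [shiftF_length] using h1)).2 = 0)
              · rw [if_pos hc, if_pos ⟨hc.1, by omega, hc.2.2⟩]
              · rw [if_neg hc, if_neg (by rintro ⟨ha, hb', hcc⟩; exact hc ⟨ha, by omega, hcc⟩)]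
        · rw [stepA_shift _ _ _ _ _ hmap hz]
          refine Prod.ext ?_ rfl
          apply List.ext_getElem
          · simp [shiftF_length]
          · intro i h1 h2
            have hlt : i < om.length := by
              have := h2; rw [shiftF_length] at this; exact this
            rw [List.getElem_set, shiftF_getElem k (k + (m : Nat) + 1) d om i hlt]
            by_cases hib : (k + (m : Nat)).toNat = i
            · subst hib
              rw [if_pos rfl, if_pos ⟨by omega, by omega, hz⟩]
            · rw [if_neg hib, shiftF_getElem k (k + (m : Nat)) d om i hlt]
              by_cases hc : k ≤ (i : Int) ∧ (i : Int) < k + (m : Nat) ∧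
                  ¬((om[i]'hlt).1 = 0 ∧ (om[i]'hlt).2 = 0)
              · rw [if_pos hc, if_pos ⟨hc.1, by omega, hc.2.2⟩]
              · rw [if_neg hc, if_neg (by rintro ⟨ha, hb', hcc⟩; exact hc ⟨ha, by omega, hcc⟩)]
      · rw [stepA_oob _ _ _ (shiftF_getD_oob k (k + (m : Nat)) d om _ (by omega)) hd]
        refine Prod.ext ?_ rfl
        apply List.ext_getElem
        · simp [shiftF_length]
        · intro i h1 h2
          have hlt : i < om.length := by
            have := h1; rw [shiftF_length] at this; exact this
          rw [shiftF_getElem k (k + (m : Nat)) d om i hlt,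
              shiftF_getElem k (k + (m : Nat) + 1) d om i hlt]
          by_cases hc : k ≤ (i : Int) ∧ (i : Int) < k + (m : Nat) ∧
              ¬((om[i]'hlt).1 = 0 ∧ (om[i]'hlt).2 = 0)
          · rw [if_pos hc, if_pos ⟨hc.1, by omega, hc.2.2⟩]
          · rw [if_neg hc, if_neg (by rintro ⟨ha, hb', hcc⟩; exact hc ⟨ha, by omega, hcc⟩)]

-- phase 1 of A's loop: before the first (0,0) nothing triggers, every non-(0,0)
-- entry is rewritten to itself, so the state is unchanged
theorem L1 (m : Nat) (om : List (Int × Int)) (hm : 1 + m ≤ om.length)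
    (hnz : ∀ i : Nat, 1 ≤ i → i < 1 + m → om.getD i (0, 0) ≠ (0, 0)) :
    (PySem.List.pyRange 1 (1 + m : Int) 1).foldl driftStepA (om.map (fun x => [x.1, x.2]), 0)
      = (om.map (fun x => [x.1, x.2]), 0) := by
  induction m with
  | zero =>
      rw [show ((1 : Int) + ((0 : Nat) : Int)) = 1 by norm_num,
          PySem.List.pyRange_one_eq_nil (le_refl 1)]
      rfl
  | succ m ih =>
      rw [show ((1 : Int) + ((m + 1 : Nat) : Int)) = (1 + (m : Nat)) + 1 by push_cast; ring,
          PySem.List.pyRange_one_succ_right (by omega), List.foldl_append,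
          ih (by omega) (fun i a b c => hnz i a (by omega) c)]
      simp only [List.foldl_cons, List.foldl_nil]
      have hj : ((1 : Int) + (m : Nat)).toNat = 1 + m := by omega
      have hlen : 1 + m < om.length := by omega
      have hmap : (om.map (fun x : Int × Int => [x.1, x.2])).getD ((1 : Int) + (m : Nat)).toNat []
          = [(om[1 + m]'hlen).1, (om[1 + m]'hlen).2] := by
        rw [hj, toL_getD om (1 + m) hlen]
      have hz : ¬((om[1 + m]'hlen).1 = 0 ∧ (om[1 + m]'hlen).2 = 0) := by
        intro hc
        exact hnz (1 + m) (by omega) (by omega)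
          (by rw [getD_eq_getElem_pair om (1 + m) hlen]; exact Prod.ext hc.1 hc.2)
      rw [stepA_shift _ _ _ _ _ hmap hz]
      refine Prod.ext ?_ rfl
      rw [hj]
      have hlen' : 1 + m < (om.map (fun x : Int × Int => [x.1, x.2])).length := by simpa
      calc (om.map (fun x : Int × Int => [x.1, x.2])).set (1 + m)
              [(om[1 + m]'hlen).1 + 0, (om[1 + m]'hlen).2 + 0]
          = (om.map (fun x : Int × Int => [x.1, x.2])).set (1 + m)
              ((om.map (fun x : Int × Int => [x.1, x.2]))[1 + m]'hlen') := by
            rw [List.getElem_map]; norm_num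
        _ = om.map (fun x : Int × Int => [x.1, x.2]) := List.set_getElem_self hlen'

theorem FS_none (l : List (Int × Int)) (s : Nat) (h : findSep l s = none) :
    ∀ j < l.length, l.getD j (0, 0) ≠ (0, 0) := by
  induction l generalizing s with
  | nil => intro j hj; simp at hj
  | cons a t ih =>
      by_cases hc : a.1 = 0 ∧ a.2 = 0
      · exact absurd h (by rw [findSep, if_pos hc]; simp)
      · rw [findSep, if_neg hc] at h
        intro j hj hv
        cases j with
        | zero =>
            simp only [List.getD_cons_zero] at hv
            exact hc ⟨by rw [hv], by rw [hv]⟩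
        | succ n =>
            exact ih (s + 1) h n (by simpa using hj) (by simpa using hv)

theorem FS_some (l : List (Int × Int)) (s b : Nat) (h : findSep l s = some b) :
    s ≤ b ∧ b - s < l.length ∧ l.getD (b - s) (0, 0) = (0, 0) ∧
      ∀ i < b - s, l.getD i (0, 0) ≠ (0, 0) := by
  induction l generalizing s b with
  | nil => exact absurd h (by simp [findSep])
  | cons a t ih =>
      by_cases hc : a.1 = 0 ∧ a.2 = 0
      · rw [findSep, if_pos hc] at h
        have hb : b = s := by simpa using h.symm
        subst hb
        refine ⟨by omega, by simp, ?_, by simp⟩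
        simp only [Nat.sub_self, List.getD_cons_zero]
        exact Prod.ext hc.1 hc.2
      · rw [findSep, if_neg hc] at h
        obtain ⟨h1, h2, h3, h4⟩ := ih (s + 1) b h
        refine ⟨by omega, ?_, ?_, ?_⟩
        · simp only [List.length_cons]; omega
        · rw [show b - s = (b - (s + 1)) + 1 by omega, List.getD_cons_succ]; exact h3
        · intro i hi hv
          cases i with
          | zero =>
              simp only [List.getD_cons_zero] at hv
              exact hc ⟨by rw [hv], by rw [hv]⟩
          | succ n =>
              exact h4 n (by omega) (by simpa using hv)

-- ===== VERDICT (by name: the statement is the Claim_ definition above) =====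
theorem drift_offsets_mapping_spec : Claim_equal_drift_offsets_mapping := by
  intro om _ hpre
  unfold Spec_drift_offsets_mapping
  cases e : findSep (om.drop 1) 1 with
  | none =>
      simp only [drift_offsets_mapping, drift_offsets_mapping_alt, e, List.length_map]
      cases hn : om.length with
      | zero =>
          rw [PySem.List.pyRange_one_eq_nil (by omega)]
          rfl
      | succ n =>
          rw [show ((n + 1 : Nat) : Int) = 1 + ((n : Nat) : Int) by push_cast; ring]
          refine L1 n om (by omega) (fun i h1 h2 hv => ?_)
          have := FS_none (om.drop 1) 1 e (i - 1)
            (by rw [List.length_drop]; omega)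
          rw [drop1_getD, show 1 + (i - 1) = i by omega] at this
          exact this hv
  | some b =>
      simp only [drift_offsets_mapping, drift_offsets_mapping_alt, e, List.length_map]
      obtain ⟨hb1, hb2, hcur0, hmin0⟩ := FS_some (om.drop 1) 1 b e
      rw [List.length_drop] at hb2
      have hblen : b < om.length := by omega
      have hcur : om.getD b (0, 0) = (0, 0) := by
        rw [drop1_getD, show 1 + (b - 1) = b by omega] at hcur0
        exact hcur0
      have hmin : ∀ i : Nat, 1 ≤ i → i < b → om.getD i (0, 0) ≠ (0, 0) := by
        intro i h1 h2 hv
        have := hmin0 (i - 1) (by omega)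
        rw [drop1_getD, show 1 + (i - 1) = i by omega] at this
        exact this hv
      have hprev : (om.getD (b - 1) (0, 0)).2 ≠ -1 :=
        hpre b hblen hb1 hcur
      set d : Int := (om.getD (b - 1) (0, 0)).2 + 1 with hdd
      have hd : d ≠ 0 := by rw [hdd]; intro h0; apply hprev; omega
      have hsplit : PySem.List.pyRange 1 ((om.length : Nat) : Int) 1
          = PySem.List.pyRange 1 (b : Int) 1
            ++ ((b : Int) :: PySem.List.pyRange ((b : Int) + 1) ((om.length : Nat) : Int) 1) := by
        rw [PySem.List.pyRange_one_append 1 (b : Int) ((om.length : Nat) : Int) (by omega) (by omega),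
            PySem.List.pyRange_one_cons (a := (b : Int)) (b := ((om.length : Nat) : Int)) (by omega)]
      rw [hsplit, List.foldl_append]
      have hphase1 : (PySem.List.pyRange 1 (b : Int) 1).foldl driftStepA
          (om.map (fun x => [x.1, x.2]), 0) = (om.map (fun x => [x.1, x.2]), 0) := by
        rw [show ((b : Nat) : Int) = 1 + ((b - 1 : Nat) : Int) by omega]
        exact L1 (b - 1) om (by omega) (fun i a hb' c => hmin i a (by omega) c)
      rw [hphase1]
      simp only [List.foldl_cons]
      have hbn : ((b : Nat) : Int).toNat = b := by omega
      have hob : om[b]'hblen = (0, 0) := by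
        rw [← getD_eq_getElem_pair om b hblen]; exact hcur
      have hmap : (om.map (fun x : Int × Int => [x.1, x.2])).getD ((b : Nat) : Int).toNat []
          = [(0 : Int), (0 : Int)] := by
        rw [hbn, toL_getD om b hblen, hob]
      have hstep : driftStepA (om.map (fun x => [x.1, x.2]), 0) ((b : Nat) : Int)
          = (om.map (fun x => [x.1, x.2]), d) := by
        rw [stepA_trigger _ _ _ _ ((om.getD (b - 1) (0, 0)).2) hmap rfl rfl ?_, hdd]
        rw [hbn, toL_getD om (b - 1) (by omega), getD_eq_getElem_pair om (b - 1) (by omega)]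
        simp only [List.getD_cons_zero, List.getD_cons_succ]
      rw [hstep, ← shiftF_self ((b : Int) + 1) d om]
      have hphase2 : (PySem.List.pyRange ((b : Int) + 1) ((om.length : Nat) : Int) 1).foldl driftStepA
          (shiftF ((b : Int) + 1) ((b : Int) + 1) d om, d)
          = (shiftF ((b : Int) + 1) ((om.length : Nat) : Int) d om, d) := by
        rw [show ((om.length : Nat) : Int) = ((b : Int) + 1) + ((om.length - (b + 1) : Nat) : Int) by omega]
        exact L2 (om.length - (b + 1)) ((b : Int) + 1) om d hd (by omega)
      rw [hphase2]
      refine Prod.ext ?_ rfl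
      apply List.ext_getElem
      · simp [shiftF_length, PySem.List.length_enumerate]
      · intro i h1 h2
        have hlt : i < om.length := by
          have := h1; rw [shiftF_length] at this; exact this
        rw [shiftF_getElem ((b : Int) + 1) ((om.length : Nat) : Int) d om i hlt, List.getElem_map,
            PySem.List.getElem_enumerate om 0 i
              (by rw [PySem.List.length_enumerate]; exact hlt)]
        simp only [zero_add]
        by_cases hz : (om[i]'hlt).1 = 0 ∧ (om[i]'hlt).2 = 0
        · rw [if_neg (by rintro ⟨-, -, h5⟩; exact h5 hz),
              if_neg (by rintro ⟨-, h5⟩; exact h5 hz)]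
        · by_cases hbi : (b : Int) < (i : Int)
          · rw [if_pos ⟨by omega, by omega, hz⟩, if_pos ⟨hbi, hz⟩]
          · rw [if_neg (by rintro ⟨h5, -, -⟩; omega), if_neg (by rintro ⟨h5, -⟩; omega)]
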